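-- pv_equiv track=rewrite | github.com/PingCode76/DiagramExtractorFromExcel | app/diagram.py | nodeInformation
-- ===== SOURCE A (Python) =====
-- def getData():
--     data = {
--         # line : id_function, Sequence, Operation Type, Description, Node1, Node2
--         "a":["1","1","Col","Lorem ipsum dolor sit amet, consectetur adipiscing elit","AX23","BY12"],
--         "b":["1","2","Tra","Donec fringilla, erat non suscipit faucibus, léo mi porta enim","BY12","CF43"],
--         "c":["1","3","Tra","Proin quis tortor pharetra, pulvinar sem viate, lobortis","BY12","CG54"],
--         "d":["1","4","Fer","Nulla vel mollis sem. Quisque consectetur maximus ornare.","CG54","TR89"],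
--         "e":["1","5","Fer","Aliquam erat volutpar. Curabitur et magna","CF43","DS09"],
--         "f":["2","1","Col","Cras Suscipit hendrerit feugiat Viva porta sed consecta","AB56","KJ65"],
--         "g":["2","2","Tra","Ipsum proin quis tortora maxima Aenean lobortis","KJ65","HF32"],
--         "h":["2","3","Fer","Laculis euis mod In hac habitasse platea dictumus. Etiam dictum","HF32","ZX12"],
--         "i":["3","1","Col","Laculis euis mod In hac habitasse platea dictumus. Etiam dictum","H123","KJ65"], # add
--         "j":["3","1","Col","Laculis euis mod In hac habitasse platea dictumus. Etiam dictum","SE44","KJ65"],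
--         "k":["3","1","Tra","Laculis euis mod In hac habitasse platea dictumus. Etiam dictum","KJ65","SE45"],
--         "l":["3","1","Fer","Laculis euis mod In hac habitasse platea dictumus. Etiam dictum","SE45","ERT4"],
--         "m":["4","1","Col","hey lorem ipsum lorem in dolor","RG45","TRA2"],
--         "n":["4","1","Tra","hey lorem ipsum lorem in dolor","TRA2","ERT4"],
--         "o":["1","6","Col","Test Croisement Noeud","EEEE","AAAA"],
--         }
--     return data
--
-- def formatData(nbFunction):
--     i = 0
--     data = getData()
--     letter = []
--     z = 0
--     rows = ['a','b','c','d','e','f','g','h','i','j','k','l','m','n','o','p','q','r','s','t','u','v','w','x','y','z']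
--
--     # if there is not enough letter, add numbers in front of letters according to the length of the data
--     minLetter = 26
--     maxLetter = 51
--     sliceVar = len(getData())/26
--
--     # for the 26 letter slices of the alphabet, add the number behind the letter, according to the data
--     while z < len(getData()):
--         if z < minLetter:
--             letter.append(rows[z])
--         elif z > minLetter + 1 & z < maxLetter :
--             try:
--                 letter.append(rows[z - minLetter + 28] + str(z))
--             except:
--                 pass
--
--         z = z + 1
--
--     tableToDelete = []
--     for line in data.values():
--         if line[0] != str(nbFunction):
--             tableToDelete.append(i)
--         i = i + 1
--     for nb in tableToDelete:
--         del data[letter[nb]]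
--     return data
--
-- def nodeInformation(nbDraw):
--     nodes = {}
--     i = 0
--     numéroNoeudTable = 0
--     table1 = {}
--     table2 = {}
--     dataCurrent = formatData(nbDraw)
--     for line in dataCurrent.values():
--         i = i + 1
--         table1.update({i :line[4]})
--         table2.update({i :line[5]})
--     for key, value in table1.items():
--         for key2, value2 in table2.items():
--             if value2 == value:
--                 numéroNoeudTable = numéroNoeudTable + 1
--                 nodes.update({numéroNoeudTable : [ key , key2 ]})
--     return nodes
-- ===== SOURCE B (Python) =====
-- def getData():
--     data = {
--         # line : id_function, Sequence, Operation Type, Description, Node1, Node2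
--         "a":["1","1","Col","Lorem ipsum dolor sit amet, consectetur adipiscing elit","AX23","BY12"],
--         "b":["1","2","Tra","Donec fringilla, erat non suscipit faucibus, léo mi porta enim","BY12","CF43"],
--         "c":["1","3","Tra","Proin quis tortor pharetra, pulvinar sem viate, lobortis","BY12","CG54"],
--         "d":["1","4","Fer","Nulla vel mollis sem. Quisque consectetur maximus ornare.","CG54","TR89"],
--         "e":["1","5","Fer","Aliquam erat volutpar. Curabitur et magna","CF43","DS09"],
--         "f":["2","1","Col","Cras Suscipit hendrerit feugiat Viva porta sed consecta","AB56","KJ65"],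
--         "g":["2","2","Tra","Ipsum proin quis tortora maxima Aenean lobortis","KJ65","HF32"],
--         "h":["2","3","Fer","Laculis euis mod In hac habitasse platea dictumus. Etiam dictum","HF32","ZX12"],
--         "i":["3","1","Col","Laculis euis mod In hac habitasse platea dictumus. Etiam dictum","H123","KJ65"], # add
--         "j":["3","1","Col","Laculis euis mod In hac habitasse platea dictumus. Etiam dictum","SE44","KJ65"],
--         "k":["3","1","Tra","Laculis euis mod In hac habitasse platea dictumus. Etiam dictum","KJ65","SE45"],
--         "l":["3","1","Fer","Laculis euis mod In hac habitasse platea dictumus. Etiam dictum","SE45","ERT4"],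
--         "m":["4","1","Col","hey lorem ipsum lorem in dolor","RG45","TRA2"],
--         "n":["4","1","Tra","hey lorem ipsum lorem in dolor","TRA2","ERT4"],
--         "o":["1","6","Col","Test Croisement Noeud","EEEE","AAAA"],
--         }
--     return data
--
-- def nodeInformation(nbDraw):
--     # Skip formatData's letter/deletion machinery entirely: the selected rows are
--     # exactly the lines whose first field equals str(nbDraw), in order.  Match
--     # node1 against node2 through an index dict instead of a nested scan.
--     want = str(nbDraw)
--     lines = [line for line in getData().values() if line[0] == want]
--     index = {}
--     for i, line in enumerate(lines, 1):
--         index.setdefault(line[5], []).append(i)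
--     pairs = []
--     for i, line in enumerate(lines, 1):
--         pairs.extend([i, j] for j in index.get(line[4], []))
--     return {n: p for n, p in enumerate(pairs, 1)}
-- ===== Notes on version B (the rewrite author's own statement) =====
-- stated objective: simpler
-- what changed: B drops formatData's letter/deletion machinery (selection becomes a direct filter on line[0]==str(nbDraw)) and replaces the nested table1xtable2 scan by an index dict from node2 values to ordered key lists built in one pass.
import Mathlib
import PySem

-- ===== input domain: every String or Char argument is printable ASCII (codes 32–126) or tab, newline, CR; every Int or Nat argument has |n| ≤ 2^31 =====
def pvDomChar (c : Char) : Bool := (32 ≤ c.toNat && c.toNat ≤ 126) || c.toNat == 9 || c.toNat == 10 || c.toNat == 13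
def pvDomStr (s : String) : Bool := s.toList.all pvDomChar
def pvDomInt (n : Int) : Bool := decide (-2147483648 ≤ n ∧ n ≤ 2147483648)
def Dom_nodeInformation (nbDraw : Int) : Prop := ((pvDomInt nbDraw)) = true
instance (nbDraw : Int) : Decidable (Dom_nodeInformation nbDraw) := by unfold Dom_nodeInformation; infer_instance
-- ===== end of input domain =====

-- B replaces formatData's letter/deletion machinery by a direct filter and the nested matching scan by a node2-value index (simpler, same output).

-- ===== PORT A =====
-- shared module helper getData (literal dict; keys distinct, insertion order kept)
def getData : PySem.Dict String (List String) := PySem.Dict.mk [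
  ("a", ["1","1","Col","Lorem ipsum dolor sit amet, consectetur adipiscing elit","AX23","BY12"]),
  ("b", ["1","2","Tra","Donec fringilla, erat non suscipit faucibus, léo mi porta enim","BY12","CF43"]),
  ("c", ["1","3","Tra","Proin quis tortor pharetra, pulvinar sem viate, lobortis","BY12","CG54"]),
  ("d", ["1","4","Fer","Nulla vel mollis sem. Quisque consectetur maximus ornare.","CG54","TR89"]),
  ("e", ["1","5","Fer","Aliquam erat volutpar. Curabitur et magna","CF43","DS09"]),
  ("f", ["2","1","Col","Cras Suscipit hendrerit feugiat Viva porta sed consecta","AB56","KJ65"]),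
  ("g", ["2","2","Tra","Ipsum proin quis tortora maxima Aenean lobortis","KJ65","HF32"]),
  ("h", ["2","3","Fer","Laculis euis mod In hac habitasse platea dictumus. Etiam dictum","HF32","ZX12"]),
  ("i", ["3","1","Col","Laculis euis mod In hac habitasse platea dictumus. Etiam dictum","H123","KJ65"]),
  ("j", ["3","1","Col","Laculis euis mod In hac habitasse platea dictumus. Etiam dictum","SE44","KJ65"]),
  ("k", ["3","1","Tra","Laculis euis mod In hac habitasse platea dictumus. Etiam dictum","KJ65","SE45"]),
  ("l", ["3","1","Fer","Laculis euis mod In hac habitasse platea dictumus. Etiam dictum","SE45","ERT4"]),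
  ("m", ["4","1","Col","hey lorem ipsum lorem in dolor","RG45","TRA2"]),
  ("n", ["4","1","Tra","hey lorem ipsum lorem in dolor","TRA2","ERT4"]),
  ("o", ["1","6","Col","Test Croisement Noeud","EEEE","AAAA"])]

-- formatData, with str(nbFunction) computed once up front (same value each loop iteration).
-- sliceVar (an unused float) is omitted.  letter[z], rows[z], line[0], letter[nb] indexing uses
-- pyGet? with .getD "": exact here, every index taken is in range / every erased key present.
def formatDataCore (s : String) : PySem.Dict String (List String) :=
  let data := getData
  let rows : List String := ["a","b","c","d","e","f","g","h","i","j","k","l","m","n","o","p","q","r","s","t","u","v","w","x","y","z"]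
  let minLetter : Int := 26
  let maxLetter : Int := 51
  -- while z < len(getData()): Python's 'z > minLetter + 1 & z < maxLetter' chains as
  -- z > ((minLetter+1) & z) ∧ ((minLetter+1) & z) < maxLetter  (& binds tighter than comparisons)
  let letter : List String := (PySem.List.pyRange 0 (getData.size) 1).foldl
    (fun letter z =>
      if z < minLetter then letter ++ [(PySem.List.pyGet? rows z).getD ""]
      else if z > PySem.Int.band (minLetter + 1) z ∧ PySem.Int.band (minLetter + 1) z < maxLetter then
        match PySem.List.pyGet? rows (z - minLetter + 28) with
        | some r => letter ++ [r ++ PySem.Int.toStr z]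
        | none => letter            -- try/except IndexError: pass
      else letter) []
  let tdl := data.values.foldl
    (fun (st : List Int × Int) line =>
      (if (PySem.List.pyGet? line 0).getD "" ≠ s then st.1 ++ [st.2] else st.1, st.2 + 1))
    ([], 0)
  tdl.1.foldl (fun d nb => d.erase ((PySem.List.pyGet? letter nb).getD "")) data

def formatData (nbFunction : Int) : PySem.Dict String (List String) :=
  formatDataCore (PySem.Int.toStr nbFunction)

def nodeInformation (nbDraw : Int) : List (Int × List Int) :=
  let dataCurrent := formatData nbDraw
  -- first loop: i, table1, table2
  let t := dataCurrent.values.foldl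
    (fun (st : Int × PySem.Dict Int String × PySem.Dict Int String) line =>
      let i := st.1 + 1
      (i, st.2.1.insert i ((PySem.List.pyGet? line 4).getD ""),
          st.2.2.insert i ((PySem.List.pyGet? line 5).getD "")))
    (0, PySem.Dict.mk [], PySem.Dict.mk [])
  -- nested matching loop: numéroNoeudTable, nodes
  let res := t.2.1.items.foldl
    (fun (st : Int × PySem.Dict Int (List Int)) kv =>
      t.2.2.items.foldl
        (fun st2 kv2 =>
          if kv2.2 = kv.2 then (st2.1 + 1, st2.2.insert (st2.1 + 1) [kv.1, kv2.1]) else st2)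
        (st.1, st.2))
    ((0 : Int), PySem.Dict.mk [])
  res.2.items

-- ===== PORT B =====
-- B does not use formatData: selection is a filter, matching goes through an index
-- dict node2-value -> ordered positions; positions come from zipIdx, not a counter.
def nodeInformation_alt (nbDraw : Int) : List (Int × List Int) :=
  let want := PySem.Int.toStr nbDraw
  let lines := getData.values.filter (fun line => ((PySem.List.pyGet? line 0).getD "") == want)
  let numbered : List (Int × List String) := (lines.zipIdx 1).map (fun p => ((p.2 : Int), p.1))
  let index : PySem.Dict String (List Int) :=
    numbered.foldl (fun d p => d.modify ((PySem.List.pyGet? p.2 5).getD "") [] (· ++ [p.1])) (PySem.Dict.mk [])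
  let pairs : List (List Int) :=
    numbered.flatMap (fun p => (index.getD ((PySem.List.pyGet? p.2 4).getD "") []).map (fun j => [p.1, j]))
  (pairs.zipIdx 1).map (fun q => ((q.2 : Int), q.1))

-- ===== PRECONDITION & SPEC =====
def Spec_nodeInformation (nbDraw : Int) (out : List (Int × List Int)) : Prop := out = nodeInformation_alt nbDraw
instance (nbDraw : Int) (out : List (Int × List Int)) : Decidable (Spec_nodeInformation nbDraw out) := by unfold Spec_nodeInformation; infer_instance

-- ===== CLAIM (what is proved, stated in full; the proofs are below) =====
def Claim_equal_nodeInformation : Prop := ∀ (nbDraw : Int), Dom_nodeInformation nbDraw → Spec_nodeInformation nbDraw (nodeInformation nbDraw)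

-- ===== LEMMAS AND PROOFS =====
-- the selection loop of formatData, when every line is rejected, collects exactly the index range
theorem tdlFold_all (s : String) (l : List (List String)) (acc : List Int × Int)
    (h : ∀ line ∈ l, (PySem.List.pyGet? line 0).getD "" ≠ s) :
    l.foldl (fun (st : List Int × Int) line =>
        (if (PySem.List.pyGet? line 0).getD "" ≠ s then st.1 ++ [st.2] else st.1, st.2 + 1)) acc
      = (acc.1 ++ PySem.List.pyRange acc.2 (acc.2 + l.length) 1, acc.2 + l.length) := by
  induction l generalizing acc with
  | nil => simp [PySem.List.pyRange_one_eq_nil]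
  | cons hd tl ih =>
    simp only [List.foldl_cons, if_pos (h hd (by simp))]
    rw [ih _ (fun line hl => h line (by simp [hl]))]
    have e : acc.2 + (((hd :: tl).length : Nat) : Int) = (acc.2 + 1) + ((tl.length : Nat) : Int) := by
      simp; ring
    rw [e]
    conv_rhs => rw [PySem.List.pyRange_one_cons (show acc.2 < acc.2 + 1 + ((tl.length : Nat) : Int) by omega)]
    simp

-- every first field of getData is one of "1".."4"
theorem getData_first_fields (s : String)
    (h1 : ¬ s = "1") (h2 : ¬ s = "2") (h3 : ¬ s = "3") (h4 : ¬ s = "4") :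
    ∀ line ∈ getData.values, (PySem.List.pyGet? line 0).getD "" ≠ s := by
  intro line hl
  rw [show getData.values = getData.items.map (·.2) from rfl, getData] at hl
  simp only [List.map, List.mem_cons, List.not_mem_nil, or_false] at hl
  rcases hl with rfl|rfl|rfl|rfl|rfl|rfl|rfl|rfl|rfl|rfl|rfl|rfl|rfl|rfl|rfl
  all_goals intro hc
  all_goals first
    | exact h1 (hc.symm.trans (by decide))
    | exact h2 (hc.symm.trans (by decide))
    | exact h3 (hc.symm.trans (by decide))
    | exact h4 (hc.symm.trans (by decide))

-- if str(nbDraw) is none of "1".."4", formatData deletes every line …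
theorem formatDataCore_not_selected (s : String)
    (h1 : ¬ s = "1") (h2 : ¬ s = "2") (h3 : ¬ s = "3") (h4 : ¬ s = "4") :
    formatDataCore s = PySem.Dict.mk [] := by
  unfold formatDataCore
  dsimp only
  rw [tdlFold_all s getData.values ([], 0) (getData_first_fields s h1 h2 h3 h4)]
  decide

-- … and B's filter keeps none
theorem filter_not_selected (s : String)
    (h1 : ¬ s = "1") (h2 : ¬ s = "2") (h3 : ¬ s = "3") (h4 : ¬ s = "4") :
    getData.values.filter (fun line => ((PySem.List.pyGet? line 0).getD "") == s) = [] := by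
  rw [List.filter_eq_nil_iff]
  intro line hl
  simpa using getData_first_fields s h1 h2 h3 h4 line hl

-- ===== VERDICT (by name: the statement is the Claim_ definition above) =====
theorem nodeInformation_spec : Claim_equal_nodeInformation := by
  intro n _
  unfold Spec_nodeInformation nodeInformation nodeInformation_alt formatData
  generalize PySem.Int.toStr n = s
  by_cases h1 : s = "1"
  · subst h1; decide
  by_cases h2 : s = "2"
  · subst h2; decide
  by_cases h3 : s = "3"
  · subst h3; decide
  by_cases h4 : s = "4"
  · subst h4; decide
  · dsimp only
    rw [formatDataCore_not_selected s h1 h2 h3 h4, filter_not_selected s h1 h2 h3 h4]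
    decide
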